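-- pv_equiv track=rewrite | github.com/sharathkumar49/learning | DSA/Python Data Structures/Queue/PrintFirstNNumbers56.py | print_first_n_numbers_56
-- ===== SOURCE A (Python) =====
-- from collections import deque
--
-- class Queue:
--     def __init__(self):
--         self.buffer = deque()
--     def enqueue(self, val):
--         self.buffer.appendleft(val)
--     def dequeue(self):
--         return self.buffer.pop()
--     def is_empty(self):
--         return len(self.buffer)==0
--     def size(self):
--         return len(self.buffer)
--
-- def print_first_n_numbers_56(n):
--     q = Queue()
--     q.enqueue('5')
--     q.enqueue('6')
--     result = []
--     for _ in range(n):
--         curr = q.dequeue()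
--         result.append(curr)
--         q.enqueue(curr + '5')
--         q.enqueue(curr + '6')
--     return result
-- ===== SOURCE B (Python) =====
-- def print_first_n_numbers_56(n):
--     # k-th element (0-based) is the binary representation of k+2 with its
--     # leading '1' stripped, digits mapped 0->'5', 1->'6'  (BFS order = level order)
--     result = []
--     for k in range(n):
--         s = bin(k + 2)[3:]
--         result.append(''.join('5' if c == '0' else '6' for c in s))
--     return result
-- ===== Notes on version B (the rewrite author's own statement) =====
-- stated objective: alternative
-- what changed: Replaced the Queue class and BFS queue loop by a closed-form per-index decode: the k-th string is the binary representation of k+2 without its leading 1, with bits mapped 0->'5' and 1->'6'; no queue is maintained.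
import Mathlib
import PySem

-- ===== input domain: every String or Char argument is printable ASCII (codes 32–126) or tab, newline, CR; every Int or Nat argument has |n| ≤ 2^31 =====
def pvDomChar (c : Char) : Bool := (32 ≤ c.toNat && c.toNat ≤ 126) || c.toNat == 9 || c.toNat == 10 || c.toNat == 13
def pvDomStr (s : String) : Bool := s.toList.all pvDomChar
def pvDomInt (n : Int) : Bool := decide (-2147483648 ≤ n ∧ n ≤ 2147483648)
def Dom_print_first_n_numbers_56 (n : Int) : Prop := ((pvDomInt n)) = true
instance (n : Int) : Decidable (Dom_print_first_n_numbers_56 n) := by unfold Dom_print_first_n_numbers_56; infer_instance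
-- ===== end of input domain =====

-- B replaces A's BFS queue by a closed-form per-index decode (binary of k+2, leading bit
-- stripped, 0->'5', 1->'6'); a genuinely different algorithm of similar cost (objective: alternative).


-- ===== PORT A =====
-- The Queue's deque (appendleft / pop) is the buffer list: enqueue v = v :: buffer,
-- dequeue = last element (pop from the right).  The queue starts with 2 elements and each
-- iteration removes one and adds two, so dequeue never sees an empty queue; the `.getD ""`
-- default is unreachable (Python would raise IndexError there, which never happens).
def pfnLoop : Nat → List String → List String → List String
  | 0, _, res => res
  | k + 1, q, res =>
    let curr := q.getLast?.getD ""        -- curr = q.dequeue()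
    pfnLoop k ((curr ++ "6") :: (curr ++ "5") :: q.dropLast)   -- enqueue curr+'5'; enqueue curr+'6'
      (res ++ [curr])                      -- result.append(curr)

def print_first_n_numbers_56 (n : Int) : List String :=
  -- q.enqueue('5'); q.enqueue('6')  gives buffer ['6', '5'] (appendleft); loop range(n)
  pfnLoop n.toNat ["6", "5"] []

-- ===== PORT B =====
def print_first_n_numbers_56_alt (n : Int) : List String :=
  (List.range n.toNat).map (fun (k : Nat) =>
    -- s = bin(k + 2)[3:]  — bin gives '0b1…'; the slice [3:] (nonneg, in range) is drop 3
    let s := (PySem.Int.toBinChars0b ((k : Int) + 2)).drop 3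
    -- ''.join('5' if c == '0' else '6' for c in s)
    String.ofList (s.map (fun c => if c = '0' then '5' else '6')))

-- ===== PRECONDITION & SPEC =====
def Spec_print_first_n_numbers_56 (n : Int) (out : List String) : Prop := out = print_first_n_numbers_56_alt n
instance (n : Int) (out : List String) : Decidable (Spec_print_first_n_numbers_56 n out) := by unfold Spec_print_first_n_numbers_56; infer_instance

-- ===== CLAIM (what is proved, stated in full; the proofs are below) =====
def Claim_equal_print_first_n_numbers_56 : Prop := ∀ (n : Int), Dom_print_first_n_numbers_56 n → Spec_print_first_n_numbers_56 n (print_first_n_numbers_56 n)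

-- ===== LEMMAS AND PROOFS =====

-- binary digits of m (MSB first), [] for 0 — proof-side characterisation of Nat.toDigits 2
def binDigits (m : Nat) : List Char :=
  if h : m = 0 then [] else binDigits (m / 2) ++ [Nat.digitChar (m % 2)]
termination_by m
decreasing_by exact Nat.div_lt_self (Nat.pos_of_ne_zero h) (by omega)

lemma toDigitsCore_eq_binDigits (f : Nat) : ∀ (n : Nat) (acc : List Char),
    1 ≤ n → n < f → Nat.toDigitsCore 2 f n acc = binDigits n ++ acc := by
  induction f with
  | zero => intro n acc h1 h2; omega
  | succ f ih =>
    intro n acc h1 h2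
    rw [Nat.toDigitsCore]
    by_cases h : n / 2 = 0
    · have hn : n = 1 := by omega
      subst hn
      simp [binDigits]
    · simp only [h, if_false]
      rw [ih (n / 2) _ (by omega) (by omega)]
      conv_rhs => rw [binDigits]
      simp [show n ≠ 0 by omega]

lemma toDigits_eq_binDigits (n : Nat) (h : 1 ≤ n) :
    Nat.toDigits 2 n = binDigits n := by
  have := toDigitsCore_eq_binDigits (n + 1) n [] h (by omega)
  simpa [Nat.toDigits] using this

lemma binDigits_ne_nil (m : Nat) (h : 1 ≤ m) : binDigits m ≠ [] := by
  rw [binDigits]; simp [show m ≠ 0 by omega]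

lemma binDigits_two_mul (m : Nat) (h : 1 ≤ m) :
    binDigits (2 * m) = binDigits m ++ ['0'] := by
  conv_lhs => rw [binDigits]
  simp [show 2 * m ≠ 0 by omega, Nat.mul_div_cancel_left m (by omega : 0 < 2),
    Nat.mul_mod_right, Nat.digitChar]

lemma binDigits_two_mul_add_one (m : Nat) (h : 1 ≤ m) :
    binDigits (2 * m + 1) = binDigits m ++ ['1'] := by
  conv_lhs => rw [binDigits]
  simp [Nat.mul_add_div (by omega : 0 < 2), Nat.digitChar]

-- the closed-form value of the m-th BFS string (m ≥ 2)
def fs (m : Nat) : String :=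
  String.ofList (((binDigits m).drop 1).map (fun c => if c = '0' then '5' else '6'))

lemma fs_two_mul (m : Nat) (h : 1 ≤ m) : fs (2 * m) = fs m ++ "5" := by
  unfold fs
  rw [binDigits_two_mul m h]
  obtain ⟨c, t, ht⟩ : ∃ c t, binDigits m = c :: t := by
    cases hb : binDigits m with
    | nil => exact absurd hb (binDigits_ne_nil m h)
    | cons c t => exact ⟨c, t, rfl⟩
  rw [ht]
  show String.ofList _ = String.ofList _ ++ String.ofList ['5']
  rw [← String.ofList_append]
  simp

lemma fs_two_mul_add_one (m : Nat) (h : 1 ≤ m) : fs (2 * m + 1) = fs m ++ "6" := by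
  unfold fs
  rw [binDigits_two_mul_add_one m h]
  obtain ⟨c, t, ht⟩ : ∃ c t, binDigits m = c :: t := by
    cases hb : binDigits m with
    | nil => exact absurd hb (binDigits_ne_nil m h)
    | cons c t => exact ⟨c, t, rfl⟩
  rw [ht]
  show String.ofList _ = String.ofList _ ++ String.ofList ['6']
  rw [← String.ofList_append]
  simp

-- loop invariant: after some iterations the queue holds fs s, fs (s+1), …, fs (2s-1)
-- in pop order (stored reversed: deque front = newest)
lemma pfnLoop_eq : ∀ (k s : Nat) (res : List String), 1 ≤ s →
    pfnLoop k (((List.range' s s).map fs).reverse) res = res ++ (List.range' s k).map fs := by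
  intro k
  induction k with
  | zero => intro s res _; simp [pfnLoop]
  | succ k ih =>
    intro s res hs
    have hsplit : List.range' s s = s :: List.range' (s + 1) (s - 1) := by
      cases s with
      | zero => omega
      | succ t => rw [List.range'_succ]; simp
    rw [hsplit]
    simp only [List.map_cons, List.reverse_cons, pfnLoop,
      List.getLast?_concat, Option.getD_some, List.dropLast_concat]
    have hq : (fs s ++ "6") :: (fs s ++ "5") :: ((List.range' (s + 1) (s - 1)).map fs).reverse
        = ((List.range' (s + 1) (s + 1)).map fs).reverse := by
      have hr : List.range' (s + 1) (s - 1) ++ List.range' (2 * s) 2 = List.range' (s + 1) (s + 1) := by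
        have := List.range'_append (s := s + 1) (m := s - 1) (n := 2) (step := 1)
        have h1 : s + 1 + 1 * (s - 1) = 2 * s := by omega
        have h2 : s - 1 + 2 = s + 1 := by omega
        rwa [h1, h2] at this
      rw [← hr]
      have h2s : List.range' (2 * s) 2 = [2 * s, 2 * s + 1] := rfl
      simp [h2s, fs_two_mul s hs, fs_two_mul_add_one s hs]
    rw [hq, ih (s + 1) (res ++ [fs s]) (by omega)]
    rw [List.range'_succ]
    simp

lemma fs_eq_alt (k : Nat) :
    String.ofList (((PySem.Int.toBinChars0b ((k : Int) + 2)).drop 3).map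
      (fun c => if c = '0' then '5' else '6')) = fs (k + 2) := by
  have hnn : ¬ ((k : Int) + 2 < 0) := by omega
  have htn : ((k : Int) + 2).toNat = k + 2 := by omega
  rw [PySem.Int.toBinChars0b]
  simp only [hnn, if_false, htn]
  rw [toDigits_eq_binDigits (k + 2) (by omega)]
  rfl

-- ===== VERDICT (by name: the statement is the Claim_ definition above) =====
theorem print_first_n_numbers_56_spec : Claim_equal_print_first_n_numbers_56 := by
  intro n _
  unfold Spec_print_first_n_numbers_56 print_first_n_numbers_56 print_first_n_numbers_56_alt
  have h2 : binDigits 2 = ['1', '0'] := by rw [binDigits, binDigits, binDigits]; rfl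
  have h3 : binDigits 3 = ['1', '1'] := by rw [binDigits, binDigits, binDigits]; rfl
  have hinit : (["6", "5"] : List String) = ((List.range' 2 2).map fs).reverse := by
    show _ = [fs 3, fs 2]
    simp [fs, h2, h3]
  rw [hinit, pfnLoop_eq n.toNat 2 [] (by omega)]
  rw [List.range'_eq_map_range]
  simp only [List.nil_append, List.map_map]
  refine List.map_congr_left ?_
  intro k _
  simp only [Function.comp]
  rw [fs_eq_alt]
  congr 1
  omega
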